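-- pv_equiv track=rewrite | github.com/NatureBlueee/wow-harness | scripts/install/wow_global_hooks.py | strip_legacy_voiceagent_block
-- ===== SOURCE A (Python) =====
-- def strip_legacy_voiceagent_block(text: str) -> str:
--     """Remove the old VoiceAgent-only ~/.bashrc / ~/.zshrc shim (if present)."""
--     marker = "wow-harness VoiceAgent agent shim"
--     if marker not in text:
--         return text
--     lines = text.splitlines(keepends=True)
--     out: list[str] = []
--     i = 0
--     while i < len(lines):
--         if marker in lines[i]:
--             i += 1
--             prev_non_empty = ""
--             while i < len(lines):
--                 li = lines[i]
--                 s = li.strip()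
--                 if s and not s.startswith("#"):
--                     prev_non_empty = li
--                 if s == "fi" and "agent()" in prev_non_empty and "_voiceagent_agent_shim" in prev_non_empty:
--                     i += 1
--                     break
--                 i += 1
--             continue
--         out.append(lines[i])
--         i += 1
--     return "".join(out)
-- ===== SOURCE B (Python) =====
-- def strip_legacy_voiceagent_block(text: str) -> str:
--     """Remove the old VoiceAgent-only ~/.bashrc / ~/.zshrc shim (if present).
--
--     The legacy block always extends to end-of-file (the terminating
--     condition of the original scanner is unsatisfiable), so instead of
--     scanning a splitlines() list we locate the first marker occurrence
--     directly and cut the text at the start of the line containing it."""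
--     marker = "wow-harness VoiceAgent agent shim"
--     pos = text.find(marker)
--     if pos < 0:
--         return text
--     start = pos
--     while start > 0 and text[start - 1] not in "\n\r":
--         start -= 1
--     return text[:start]
-- ===== Notes on version B (the rewrite author's own statement) =====
-- stated objective: simpler
-- what changed: A splits the text into lines and runs a nested while-loop state machine (index, output accumulator, previous-non-empty tracking, and an inner break that can never fire, so the deleted block always extends to end-of-file); B instead locates the first marker occurrence with str.find, scans backwards to the start of the containing line, and returns the text sliced at that point, building no line list at all.
import Mathlib
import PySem

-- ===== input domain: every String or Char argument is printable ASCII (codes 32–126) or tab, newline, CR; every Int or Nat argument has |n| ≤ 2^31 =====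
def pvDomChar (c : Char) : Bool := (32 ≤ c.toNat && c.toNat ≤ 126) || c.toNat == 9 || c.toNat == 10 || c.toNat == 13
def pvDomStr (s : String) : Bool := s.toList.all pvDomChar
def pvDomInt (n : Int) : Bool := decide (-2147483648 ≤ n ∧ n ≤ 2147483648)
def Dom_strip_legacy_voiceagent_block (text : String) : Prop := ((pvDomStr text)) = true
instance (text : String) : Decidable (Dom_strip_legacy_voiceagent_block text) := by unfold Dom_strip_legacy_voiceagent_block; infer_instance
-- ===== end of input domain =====

set_option maxRecDepth 2000


-- B replaces A's splitlines-based nested while-loop state machine (whose 'fi' break is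
-- unreachable) by str.find of the marker plus a backward scan to the containing line's
-- start, cutting the text there: simpler, same values everywhere.

def pvMarker : List Char := "wow-harness VoiceAgent agent shim".toList

-- ===== PORT A =====
-- A-side helper: text.splitlines(keepends=True).  Exact on the domain's line-break
-- characters ('\n', '\r', '\r\n'); the domain admits no other Python line breaks
-- (\x0b, \x0c, \x1c-\x1e, \x85, u2028/u2029).
def pvSplitKeepGo (cur : List Char) : List Char → List (List Char)
  | [] => if cur = [] then [] else [cur]
  | '\r' :: '\n' :: cs => (cur ++ ['\r', '\n']) :: pvSplitKeepGo [] cs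
  | c :: cs =>
    if c = '\n' ∨ c = '\r' then (cur ++ [c]) :: pvSplitKeepGo [] cs
    else pvSplitKeepGo (cur ++ [c]) cs

-- inner while loop: returns the lines remaining after the block (break skips the 'fi' line)
def pvInnerA (prev : List Char) : List (List Char) → List (List Char)
  | [] => []
  | li :: rest =>
    let s := PySem.Chars.strip li
    let prev' := if s ≠ [] ∧ ¬ (PySem.Chars.startswith s ['#'] = true) then li else prev
    if s = ['f', 'i'] ∧ PySem.Chars.isIn "agent()".toList prev' = true
        ∧ PySem.Chars.isIn "_voiceagent_agent_shim".toList prev' = true then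
      rest
    else
      pvInnerA prev' rest

-- termination helper for the outer loop (cited by pvOuterA's decreasing_by)
theorem pvInnerA_length_le (prev : List Char) (ls : List (List Char)) :
    (pvInnerA prev ls).length ≤ ls.length := by
  induction ls generalizing prev with
  | nil => simp [pvInnerA]
  | cons li rest ih =>
    simp only [pvInnerA]
    split <;>
      (split
       · simp
       · exact Nat.le_succ_of_le (ih _))

-- outer while loop over the lines, with the 'out' accumulator
def pvOuterA (out : List (List Char)) : List (List Char) → List (List Char)
  | [] => out
  | li :: rest =>
    if PySem.Chars.isIn pvMarker li = true then
      pvOuterA out (pvInnerA [] rest)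
    else
      pvOuterA (out ++ [li]) rest
termination_by ls => ls.length
decreasing_by
  · exact Nat.lt_succ_of_le (pvInnerA_length_le [] rest)
  · simp

def strip_legacy_voiceagent_block (text : String) : String :=
  if PySem.Str.isIn "wow-harness VoiceAgent agent shim" text = true then
    let lines := pvSplitKeepGo [] text.toList
    String.ofList (PySem.Chars.join [] (pvOuterA [] lines))
  else
    text

-- ===== PORT B =====
-- B-side helper: the backward scan 'while start > 0 and text[start-1] not in "\n\r": start -= 1'
def pvLineStart (cs : List Char) : Nat → Nat
  | 0 => 0
  | s + 1 =>
    if cs.getD s ' ' = '\n' ∨ cs.getD s ' ' = '\r' then s + 1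
    else pvLineStart cs s

def strip_legacy_voiceagent_block_alt (text : String) : String :=
  let pos := PySem.Str.find text "wow-harness VoiceAgent agent shim"
  if pos < 0 then text
  else String.ofList (text.toList.take (pvLineStart text.toList pos.toNat))

-- ===== PRECONDITION & SPEC =====
def Spec_strip_legacy_voiceagent_block (text : String) (out : String) : Prop := out = strip_legacy_voiceagent_block_alt text
instance (text : String) (out : String) : Decidable (Spec_strip_legacy_voiceagent_block text out) := by unfold Spec_strip_legacy_voiceagent_block; infer_instance

-- ===== CLAIM (what is proved, stated in full; the proofs are below) =====
def Claim_equal_strip_legacy_voiceagent_block : Prop := ∀ (text : String), Dom_strip_legacy_voiceagent_block text → Spec_strip_legacy_voiceagent_block text (strip_legacy_voiceagent_block text)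

-- ===== LEMMAS AND PROOFS =====

-- a non-whitespace character of a line survives strip()
theorem mem_strip_of_not_isspace {c : Char} {cs : List Char}
    (hm : c ∈ cs) (hs : PySem.Chars.isspace c = false) : c ∈ PySem.Chars.strip cs := by
  have key : ∀ (l : List Char), c ∈ l → c ∈ l.dropWhile PySem.Chars.isspace := by
    intro l hl
    rcases (List.mem_append.mp (by rw [List.takeWhile_append_dropWhile] ; exact hl :
        c ∈ l.takeWhile PySem.Chars.isspace ++ l.dropWhile PySem.Chars.isspace)) with h | h
    · exact absurd (List.mem_takeWhile_imp h) (by simp [hs])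
    · exact h
  unfold PySem.Chars.strip PySem.Chars.rstrip PySem.Chars.lstrip
  exact List.mem_reverse.mpr (key _ (List.mem_reverse.mpr (key _ hm)))

-- a line whose strip() is exactly "fi" cannot contain "agent()"
theorem no_agent_of_strip_fi {li : List Char} (h : PySem.Chars.strip li = ['f', 'i']) :
    PySem.Chars.isIn "agent()".toList li = false := by
  rw [PySem.Chars.isIn_eq_false_iff]
  intro hinf
  have hp : '(' ∈ li := hinf.mem (by decide)
  have := mem_strip_of_not_isspace hp (by decide)
  rw [h] at this
  simp at this

-- A's inner break is unreachable, so the inner loop always consumes every remaining line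
theorem pvInnerA_eq_nil (ls : List (List Char)) : ∀ prev, pvInnerA prev ls = [] := by
  induction ls with
  | nil => intro prev; simp [pvInnerA]
  | cons li rest ih =>
    intro prev
    simp only [pvInnerA]
    have hcond : ∀ p', p' = (if PySem.Chars.strip li ≠ [] ∧
        ¬ (PySem.Chars.startswith (PySem.Chars.strip li) ['#'] = true) then li else prev) →
        ¬ (PySem.Chars.strip li = ['f', 'i'] ∧ PySem.Chars.isIn "agent()".toList p' = true
          ∧ PySem.Chars.isIn "_voiceagent_agent_shim".toList p' = true) := by
      intro p' hp' ⟨hfi, hag, _⟩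
      have hstart : PySem.Chars.startswith (PySem.Chars.strip li) ['#'] = false := by
        rw [hfi]; decide
      have : p' = li := by
        rw [hp']; simp [hfi]; intro hc; exact absurd hc (by decide)
      rw [this, no_agent_of_strip_fi hfi] at hag
      exact Bool.false_ne_true hag
    rw [if_neg (hcond _ rfl)]
    exact ih _

-- A's outer loop is take-until-the-first-marker-line
theorem pvOuterA_eq (ls : List (List Char)) : ∀ out, pvOuterA out ls =
    out ++ ls.takeWhile (fun l => ¬ PySem.Chars.isIn pvMarker l = true) := by
  induction ls with
  | nil => intro out; simp [pvOuterA]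
  | cons li rest ih =>
    intro out
    simp only [pvOuterA]
    by_cases h : PySem.Chars.isIn pvMarker li = true
    · rw [if_pos h, pvInnerA_eq_nil, pvOuterA]
      simp [h]
    · rw [if_neg h, ih]
      simp [h]

-- ---- B-side analysis: the cut index is the length of the marker-free leading lines ----

-- proof-only helper: split off the first keepends line
def pvLineSplit : List Char → List Char × List Char
  | [] => ([], [])
  | '\r' :: '\n' :: cs => (['\r', '\n'], cs)
  | c :: cs =>
    if c = '\n' ∨ c = '\r' then ([c], cs)
    else (c :: (pvLineSplit cs).1, (pvLineSplit cs).2)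

-- rewrite equations for the overlapping cons patterns
theorem pvLineSplit_cons_break (c : Char) (cs : List Char)
    (h1 : ∀ cs2, c = '\r' → cs = '\n' :: cs2 → False) (hb : c = '\n' ∨ c = '\r') :
    pvLineSplit (c :: cs) = ([c], cs) := by
  rw [pvLineSplit.eq_def]
  split
  · rename_i heq; simp at heq
  · rename_i cs2 heq
    injection heq with e1 e2
    exact (h1 cs2 e1 e2).elim
  · rename_i heq
    injection heq with e1 e2
    subst e1; subst e2
    rw [if_pos hb]

theorem pvLineSplit_cons_nonbreak (c : Char) (cs : List Char)
    (hb : ¬(c = '\n' ∨ c = '\r')) :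
    pvLineSplit (c :: cs) = (c :: (pvLineSplit cs).1, (pvLineSplit cs).2) := by
  rw [pvLineSplit.eq_def]
  split
  · rename_i heq; simp at heq
  · rename_i cs2 heq
    injection heq with e1 e2
    exact absurd (Or.inr e1) hb
  · rename_i heq
    injection heq with e1 e2
    subst e1; subst e2
    rw [if_neg hb]

theorem pvSplitKeepGo_cons_break (acc : List Char) (c : Char) (cs : List Char)
    (h1 : ∀ cs2, c = '\r' → cs = '\n' :: cs2 → False) (hb : c = '\n' ∨ c = '\r') :
    pvSplitKeepGo acc (c :: cs) = (acc ++ [c]) :: pvSplitKeepGo [] cs := by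
  rw [pvSplitKeepGo.eq_def]
  split
  · rename_i heq; simp at heq
  · rename_i cs2 heq
    injection heq with e1 e2
    exact (h1 cs2 e1 e2).elim
  · rename_i heq
    injection heq with e1 e2
    subst e1; subst e2
    rw [if_pos hb]

theorem pvSplitKeepGo_cons_nonbreak (acc : List Char) (c : Char) (cs : List Char)
    (hb : ¬(c = '\n' ∨ c = '\r')) :
    pvSplitKeepGo acc (c :: cs) = pvSplitKeepGo (acc ++ [c]) cs := by
  rw [pvSplitKeepGo.eq_def]
  split
  · rename_i heq; simp at heq
  · rename_i cs2 heq
    injection heq with e1 e2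
    exact absurd (Or.inr e1) hb
  · rename_i heq
    injection heq with e1 e2
    subst e1; subst e2
    rw [if_neg hb]

theorem pvLineSplit_append : ∀ cs : List Char, (pvLineSplit cs).1 ++ (pvLineSplit cs).2 = cs := by
  intro cs
  induction cs using pvLineSplit.induct with
  | case1 => simp [pvLineSplit]
  | case2 cs => simp [pvLineSplit]
  | case3 c cs h1 hb => rw [pvLineSplit_cons_break c cs h1 hb]; simp
  | case4 c cs h1 hb ih => rw [pvLineSplit_cons_nonbreak c cs hb]; simpa using ih

theorem pvLineSplit_ne_nil : ∀ cs : List Char, cs ≠ [] → (pvLineSplit cs).1 ≠ [] := by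
  intro cs
  induction cs using pvLineSplit.induct with
  | case1 => intro h; exact absurd rfl h
  | case2 cs => intro _; simp [pvLineSplit]
  | case3 c cs h1 hb => intro _; rw [pvLineSplit_cons_break c cs h1 hb]; simp
  | case4 c cs h1 hb ih => intro _; rw [pvLineSplit_cons_nonbreak c cs hb]; simp

theorem pvSplit_cons : ∀ (cs acc : List Char), acc ++ cs ≠ [] →
    pvSplitKeepGo acc cs = (acc ++ (pvLineSplit cs).1) :: pvSplitKeepGo [] (pvLineSplit cs).2 := by
  intro cs
  induction cs using pvLineSplit.induct with
  | case1 =>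
    intro acc h
    simp at h
    simp [pvSplitKeepGo, pvLineSplit, h]
  | case2 cs =>
    intro acc h
    simp [pvSplitKeepGo, pvLineSplit]
  | case3 c cs h1 hb =>
    intro acc h
    rw [pvSplitKeepGo_cons_break acc c cs h1 hb, pvLineSplit_cons_break c cs h1 hb]
  | case4 c cs h1 hb ih =>
    intro acc h
    rw [pvSplitKeepGo_cons_nonbreak acc c cs hb, pvLineSplit_cons_nonbreak c cs hb,
      ih (acc ++ [c]) (by simp)]
    simp

theorem pvLineSplit_struct : ∀ cs : List Char, ∃ body t,
    (pvLineSplit cs).1 = body ++ t ∧ (∀ c ∈ body, ¬(c = '\n' ∨ c = '\r')) ∧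
    (t = ['\n'] ∨ t = ['\r'] ∨ t = ['\r', '\n'] ∨ (t = [] ∧ (pvLineSplit cs).2 = [])) := by
  intro cs
  induction cs using pvLineSplit.induct with
  | case1 => exact ⟨[], [], by simp [pvLineSplit]⟩
  | case2 cs => exact ⟨[], ['\r', '\n'], by simp [pvLineSplit]⟩
  | case3 c cs h1 hb =>
    refine ⟨[], [c], by rw [pvLineSplit_cons_break c cs h1 hb]; simp, by simp, ?_⟩
    rcases hb with h | h <;> simp [h]
  | case4 c cs h1 hb ih =>
    obtain ⟨body, t, e1, e2, e3⟩ := ih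
    refine ⟨c :: body, t, by rw [pvLineSplit_cons_nonbreak c cs hb]; simp [e1], ?_, ?_⟩
    · intro x hx
      rcases List.mem_cons.mp hx with rfl | hx
      · exact hb
      · exact e2 x hx
    · rcases e3 with h | h | h | ⟨h, h'⟩
      · exact .inl h
      · exact .inr (.inl h)
      · exact .inr (.inr (.inl h))
      · exact .inr (.inr (.inr ⟨h, by rw [pvLineSplit_cons_nonbreak c cs hb]; exact h'⟩))

theorem pvMarker_all_nonbreak : pvMarker.all (fun c => !(c == '\n' || c == '\r')) = true := by
  decide

theorem pvMarker_nonbreak : ∀ c ∈ pvMarker, ¬(c = '\n' ∨ c = '\r') := by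
  intro c hc
  have := List.all_eq_true.mp pvMarker_all_nonbreak c hc
  simp at this
  intro h
  rcases h with h | h <;> simp [h] at this

-- shorten a prefix of an append when it fits in the left part
theorem prefix_left_of_le {M u v : List Char} (h : M <+: u ++ v) (hl : M.length ≤ u.length) :
    M <+: u := by
  have hM : M = (u ++ v).take M.length := List.prefix_iff_eq_take.mp h
  rw [List.take_append_of_le_length hl] at hM
  exact hM ▸ List.take_prefix _ _

-- core of the no-straddling argument, for a nonempty all-break terminator t
theorem occ_core (body t r : List Char) (i : Nat) (htne : t ≠ [])
    (htbreak : ∀ c ∈ t, c = '\n' ∨ c = '\r')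
    (hocc : pvMarker <+: (body ++ t ++ r).drop i)
    (hi : i < body.length + t.length) :
    i + 33 ≤ body.length := by
  obtain ⟨u, hu⟩ := hocc
  have hMlen : pvMarker.length = 33 := by decide
  have hchar : ∀ j, j < 33 → (body ++ t ++ r)[i + j]? = pvMarker[j]? := by
    intro j hj
    rw [← List.getElem?_drop, ← hu, List.getElem?_append_left (by omega)]
  have hmarkat : ∀ j, j < 33 → ∃ c, pvMarker[j]? = some c ∧ ¬(c = '\n' ∨ c = '\r') := by
    intro j hj
    exact ⟨pvMarker[j]'(by omega), by simp [hMlen ▸ hj],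
      pvMarker_nonbreak _ (List.getElem_mem _)⟩
  by_contra hcon
  push_neg at hcon
  by_cases hib : body.length ≤ i
  · -- cs[i] is a t-character (a break) but also the marker's first character
    have hq : i - body.length < t.length := by omega
    have h1 : (body ++ t ++ r)[i]? = t[i - body.length]? := by
      rw [List.append_assoc, List.getElem?_append_right hib, List.getElem?_append_left hq]
    obtain ⟨c, hc, hcnb⟩ := hmarkat 0 (by omega)
    have h2 : (body ++ t ++ r)[i]? = some c := by
      have := hchar 0 (by omega)
      simpa [hc] using this
    have : c ∈ t := List.mem_of_getElem? (h1 ▸ h2)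
    exact hcnb (htbreak c this)
  · -- the occurrence would cover cs[body.length] = t[0], a break character
    push_neg at hib
    have hj : body.length - i < 33 := by omega
    have h1 : (body ++ t ++ r)[body.length]? = t[0]? := by
      rw [List.append_assoc, List.getElem?_append_right (le_refl _), Nat.sub_self,
        List.getElem?_append_left (List.length_pos_of_ne_nil htne)]
    obtain ⟨c, hc, hcnb⟩ := hmarkat (body.length - i) hj
    have h2 : (body ++ t ++ r)[i + (body.length - i)]? = some c := by
      have := hchar _ hj
      simpa [hc] using this
    rw [show i + (body.length - i) = body.length by omega, h1] at h2
    have : c ∈ t := List.mem_of_getElem? h2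
    exact hcnb (htbreak c this)

-- an occurrence of the marker that starts inside the first line lies inside its body
theorem occ_in_body (body t r : List Char) (i : Nat)
    (ht : t = ['\n'] ∨ t = ['\r'] ∨ t = ['\r', '\n'] ∨ (t = [] ∧ r = []))
    (hocc : pvMarker <+: (body ++ t ++ r).drop i)
    (hi : i < body.length + t.length) :
    i + 33 ≤ body.length := by
  rcases ht with h | h | h | ⟨h, h'⟩
  · exact occ_core body t r i (by simp [h])
      (by subst h; intro c hc; simp at hc; subst hc; simp) hocc hi
  · exact occ_core body t r i (by simp [h])
      (by subst h; intro c hc; simp at hc; subst hc; simp) hocc hi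
  · exact occ_core body t r i (by simp [h])
      (by subst h; intro c hc; simp at hc; rcases hc with rfl | rfl <;> simp) hocc hi
  · subst h; subst h'
    obtain ⟨u, hu⟩ := hocc
    have hMlen : pvMarker.length = 33 := by decide
    have := congrArg List.length hu
    simp [hMlen] at this hi ⊢
    omega

-- no marker occurrence can start inside a marker-free first line
theorem no_occ_in_line (body t r : List Char) (i : Nat)
    (ht : t = ['\n'] ∨ t = ['\r'] ∨ t = ['\r', '\n'] ∨ (t = [] ∧ r = []))
    (hfree : ¬ PySem.Chars.isIn pvMarker (body ++ t) = true)
    (hi : i < body.length + t.length) :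
    ¬ pvMarker <+: (body ++ t ++ r).drop i := by
  intro hocc
  have hfit := occ_in_body body t r i ht hocc hi
  have hMlen : pvMarker.length = 33 := by decide
  have hdrop : (body ++ t ++ r).drop i = body.drop i ++ (t ++ r) := by
    rw [List.append_assoc, List.drop_append_of_le_length (by omega)]
  rw [hdrop] at hocc
  have hpre : pvMarker <+: body.drop i :=
    prefix_left_of_le hocc (by simp [hMlen]; omega)
  have hinf : pvMarker <:+: body ++ t :=
    (hpre.isInfix.trans (List.drop_suffix i body).isInfix).trans
      (List.prefix_append body t).isInfix
  exact hfree ((PySem.Chars.isIn_iff_infix _ _).mpr hinf)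

-- the backward scan stops at 0 when everything before the index is non-break
theorem pvLineStart_eq_zero (cs : List Char) (p : Nat)
    (h : ∀ j < p, ¬(cs.getD j ' ' = '\n' ∨ cs.getD j ' ' = '\r')) : pvLineStart cs p = 0 := by
  induction p with
  | zero => rfl
  | succ p ih =>
    rw [pvLineStart, if_neg (h p (Nat.lt_succ_self p))]
    exact ih (fun j hj => h j (hj.trans (Nat.lt_succ_self p)))

-- the backward scan from inside the tail stops at the first line's boundary
theorem pvLineStart_shift (l r : List Char) (hl : l ≠ [])
    (hlast : l.getD (l.length - 1) ' ' = '\n' ∨ l.getD (l.length - 1) ' ' = '\r') :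
    ∀ p, pvLineStart (l ++ r) (l.length + p) = l.length + pvLineStart r p := by
  intro p
  induction p with
  | zero =>
    obtain ⟨k, hk⟩ : ∃ k, l.length = k + 1 :=
      ⟨l.length - 1, by have := List.length_pos_of_ne_nil hl; omega⟩
    have hg : (l ++ r).getD k ' ' = l.getD k ' ' := List.getD_append _ _ _ _ (by omega)
    have hr0 : pvLineStart r 0 = 0 := rfl
    rw [hr0, Nat.add_zero, hk, pvLineStart, hg,
      if_pos (by rw [show k = l.length - 1 by omega]; exact hlast)]
  | succ p ih =>
    have hg : (l ++ r).getD (l.length + p) ' ' = r.getD p ' ' := by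
      rw [List.getD_append_right _ _ _ _ (by omega)]
      simp
    rw [show l.length + (p + 1) = (l.length + p) + 1 by omega, pvLineStart, hg, pvLineStart]
    split
    · omega
    · rw [ih]

-- the first global occurrence, when no occurrence starts in the first line, is shifted
theorem pvFind_shift (l r : List Char)
    (hno : ∀ i < l.length, ¬ pvMarker <+: (l ++ r).drop i)
    (hr : pvMarker <:+: r) :
    (PySem.Chars.find (l ++ r) pvMarker).toNat = l.length + (PySem.Chars.find r pvMarker).toNat := by
  have hcs : pvMarker <:+: l ++ r := hr.trans (List.suffix_append l r).isInfix
  have h0 : 0 ≤ PySem.Chars.find (l ++ r) pvMarker := (PySem.Chars.find_nonneg_iff _ _).mpr hcs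
  have h0r : 0 ≤ PySem.Chars.find r pvMarker := (PySem.Chars.find_nonneg_iff _ _).mpr hr
  obtain ⟨hpre, hmin⟩ := PySem.Chars.find_spec h0
  obtain ⟨hprer, hminr⟩ := PySem.Chars.find_spec h0r
  set F := (PySem.Chars.find (l ++ r) pvMarker).toNat with hF
  set f := (PySem.Chars.find r pvMarker).toNat with hf
  have hFl : l.length ≤ F := by
    by_contra hc
    exact hno F (by omega) hpre
  have hdropF : (l ++ r).drop F = r.drop (F - l.length) := by
    rw [List.drop_append, List.drop_eq_nil_of_le (by omega)]
    simp
  have h1 : f ≤ F - l.length := by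
    by_contra hc
    exact hminr (F - l.length) (by omega) (hdropF ▸ hpre)
  have h2 : ¬ (l.length + f < F) := by
    intro hc
    refine hmin (l.length + f) hc ?_
    rw [List.drop_append, List.drop_eq_nil_of_le (by omega)]
    simpa using hprer
  omega

-- join over a nil separator peels one line
theorem pvJoin_nil_cons (x : List Char) (L : List (List Char)) :
    PySem.Chars.join [] (x :: L) = x ++ PySem.Chars.join [] L := by
  cases L with
  | nil => simp [PySem.Chars.join_singleton, PySem.Chars.join_nil]
  | cons y L => rw [PySem.Chars.join_cons_cons]; simp

-- MAIN LEMMA: B's cut equals A's marker-free leading lines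
theorem pvMain : ∀ n (cs : List Char), cs.length ≤ n → pvMarker <:+: cs →
    cs.take (pvLineStart cs (PySem.Chars.find cs pvMarker).toNat) =
      PySem.Chars.join []
        ((pvSplitKeepGo [] cs).takeWhile (fun l => ¬ PySem.Chars.isIn pvMarker l = true)) := by
  intro n
  induction n with
  | zero =>
    intro cs hn hinf
    have hcs : cs = [] := List.eq_nil_of_length_eq_zero (Nat.le_zero.mp hn)
    subst hcs
    have : pvMarker = [] := List.eq_nil_of_infix_nil hinf
    exact absurd this (by decide)
  | succ n ih =>
    intro cs hn hinf
    rcases eq_or_ne cs [] with rfl | hne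
    · have : pvMarker = [] := List.eq_nil_of_infix_nil hinf
      exact absurd this (by decide)
    obtain ⟨body, t, hbt, hnb, ht0⟩ := pvLineSplit_struct cs
    set l := (pvLineSplit cs).1 with hldef
    set r := (pvLineSplit cs).2 with hrdef
    have hlr : l ++ r = cs := pvLineSplit_append cs
    have hlne : l ≠ [] := pvLineSplit_ne_nil cs hne
    have ht : t = ['\n'] ∨ t = ['\r'] ∨ t = ['\r', '\n'] ∨ (t = [] ∧ r = []) := by
      rcases ht0 with h | h | h | ⟨h, h'⟩
      · exact .inl h
      · exact .inr (.inl h)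
      · exact .inr (.inr (.inl h))
      · exact .inr (.inr (.inr ⟨h, h'⟩))
    have hsplit : pvSplitKeepGo [] cs = l :: pvSplitKeepGo [] r := by
      have := pvSplit_cons cs [] (by simpa using hne)
      simpa using this
    have hcsform : cs = body ++ t ++ r := by rw [← hlr, hbt]
    have h0 : 0 ≤ PySem.Chars.find cs pvMarker := (PySem.Chars.find_nonneg_iff _ _).mpr hinf
    obtain ⟨hpre, hmin⟩ := PySem.Chars.find_spec h0
    set F := (PySem.Chars.find cs pvMarker).toNat with hFdef
    have hllen : l.length = body.length + t.length := by simp [hbt]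
    by_cases hM : PySem.Chars.isIn pvMarker l = true
    · -- the first line contains the marker: both sides are empty
      rw [hsplit, List.takeWhile_cons]
      simp only [hM, not_true, decide_false, Bool.false_eq_true, if_false]
      rw [PySem.Chars.join_nil]
      obtain ⟨s, u, hsu⟩ := (PySem.Chars.isIn_iff_infix _ _).mp hM
      have hocc0 : pvMarker <+: cs.drop s.length := by
        rw [← hlr, ← hsu, List.append_assoc, List.append_assoc, List.drop_left]
        exact ⟨u ++ r, by simp⟩
      have hFle : F ≤ s.length := by
        by_contra hc
        exact hmin s.length (by omega) hocc0
      have hslen : s.length + 33 ≤ l.length := by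
        have := congrArg List.length hsu
        have hMlen : pvMarker.length = 33 := by decide
        simp [hMlen] at this
        omega
      have hfit : F + 33 ≤ body.length :=
        occ_in_body body t r F ht (hcsform ▸ hpre) (by omega)
      have hz : pvLineStart cs F = 0 := by
        apply pvLineStart_eq_zero
        intro j hj
        have hjb : j < body.length := by omega
        have hg : cs.getD j ' ' = body.getD j ' ' := by
          rw [hcsform, List.append_assoc]
          exact List.getD_append _ _ _ _ hjb
        rw [hg, List.getD_eq_getElem _ _ hjb]
        exact hnb _ (List.getElem_mem _)
      rw [hz]
      simp
    · -- marker-free first line: peel it and recurse on the tail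
      have hno : ∀ i < l.length, ¬ pvMarker <+: cs.drop i := by
        intro i hi
        rw [hcsform]
        exact no_occ_in_line body t r i ht (hbt ▸ hM) (by omega)
      have hrinf : pvMarker <:+: r := by
        obtain ⟨j, hj⟩ := (PySem.Chars.exists_prefix_drop_iff_isIn _ _).mpr
          ((PySem.Chars.isIn_iff_infix _ _).mpr hinf)
        have hjl : l.length ≤ j := by
          by_contra hc
          exact hno j (by omega) hj
        rw [← hlr, List.drop_append, List.drop_eq_nil_of_le (by omega)] at hj
        simp at hj
        exact (PySem.Chars.isIn_iff_infix _ _).mp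
          ((PySem.Chars.exists_prefix_drop_iff_isIn _ _).mp ⟨j - l.length, hj⟩)
      have htne : t ≠ [] := by
        rcases ht with h | h | h | ⟨h, h'⟩
        · subst h; simp
        · subst h; simp
        · subst h; simp
        · exact absurd (List.eq_nil_of_infix_nil (h' ▸ hrinf)) (by decide)
      have hlast : l.getD (l.length - 1) ' ' = '\n' ∨ l.getD (l.length - 1) ' ' = '\r' := by
        have htlen : t.length ≠ 0 := by simpa using htne
        have hg : l.getD (l.length - 1) ' ' = t.getD (t.length - 1) ' ' := by
          rw [hbt, List.getD_append_right _ _ _ _ (by simp; omega)]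
          congr 1
          simp
          omega
        rw [hg]
        rcases ht with h | h | h | ⟨h, _⟩
        · subst h; simp
        · subst h; simp
        · subst h; simp
        · subst h; simp at htlen
      have hFshift : F = l.length + (PySem.Chars.find r pvMarker).toNat := by
        have := pvFind_shift l r (by rw [hlr]; exact hno) hrinf
        rw [hlr] at this
        exact this
      rw [hsplit, List.takeWhile_cons]
      have hMb : PySem.Chars.isIn pvMarker l = false := by
        simpa using hM
      simp only [hMb, Bool.false_eq_true, not_false_iff, decide_true, if_true]
      rw [pvJoin_nil_cons, ← ih r (by
          have h1 := congrArg List.length hlr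
          have h2 := List.length_pos_of_ne_nil hlne
          simp at h1
          omega) hrinf]
      rw [hFshift, ← hlr, pvLineStart_shift l r hlne hlast]
      rw [List.take_append]
      simp

-- ===== VERDICT (by name: the statement is the Claim_ definition above) =====
theorem strip_legacy_voiceagent_block_spec : Claim_equal_strip_legacy_voiceagent_block := by
  intro text _
  unfold Spec_strip_legacy_voiceagent_block strip_legacy_voiceagent_block
    strip_legacy_voiceagent_block_alt
  have hml : "wow-harness VoiceAgent agent shim".toList = pvMarker := rfl
  by_cases h : PySem.Str.isIn "wow-harness VoiceAgent agent shim" text = true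
  · have hinf : pvMarker <:+: text.toList := (PySem.Str.isIn_iff_infix _ _).mp h
    have h0 : 0 ≤ PySem.Chars.find text.toList pvMarker := (PySem.Chars.find_nonneg_iff _ _).mpr hinf
    rw [if_pos h]
    have hfind : PySem.Str.find text "wow-harness VoiceAgent agent shim" =
        PySem.Chars.find text.toList pvMarker := by
      rw [PySem.Str.find_eq]
      rfl
    rw [hfind, if_neg (by omega)]
    show String.ofList (PySem.Chars.join [] (pvOuterA [] (pvSplitKeepGo [] text.toList))) = _
    rw [pvOuterA_eq, List.nil_append, ← pvMain text.toList.length text.toList (le_refl _) hinf]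
  · rw [if_neg h]
    have hninf : ¬ pvMarker <:+: text.toList := fun hc => h ((PySem.Str.isIn_iff_infix _ _).mpr hc)
    have hneg : PySem.Chars.find text.toList pvMarker = -1 :=
      (PySem.Chars.find_eq_neg_one_iff _ _).mpr hninf
    rw [show PySem.Str.find text "wow-harness VoiceAgent agent shim" =
        PySem.Chars.find text.toList pvMarker from by rw [PySem.Str.find_eq]; rfl, hneg,
      if_pos (by norm_num)]
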